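-- pv_equiv track=rewrite | github.com/thedataengineer/mahabharatha | zerg/spec_loader.py | _extract_relevant_sections
-- ===== SOURCE A (Python) =====
-- def _extract_relevant_sections(text: str, keywords: set[str]) -> str:
--     """Extract paragraphs containing keyword matches, ranked by relevance.
--
--     Args:
--         text: Full spec text to search
--         keywords: Set of lowercase keywords to match
--
--     Returns:
--         Top 5 matching paragraphs joined by double newlines
--     """
--     paragraphs = text.split("\n\n")
--     scored: list[tuple[int, str]] = []
--     for para in paragraphs:
--         if not para.strip():
--             continue
--         score = sum(1 for kw in keywords if kw in para.lower())
--         if score > 0: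
--             scored.append((score, para))
--     scored.sort(key=lambda x: x[0], reverse=True)
--     return "\n\n".join(para for _, para in scored[:5])
-- ===== SOURCE B (Python) =====
-- def _extract_relevant_sections(text: str, keywords: set[str]) -> str:
--     """Counting-sort-style: bucket qualifying paragraphs by score, then walk scores downward."""
--     buckets: dict[int, list[str]] = {}
--     max_score = 0
--     for para in text.split("\n\n"):
--         if not para.strip():
--             continue
--         low = para.lower()
--         score = sum(1 for kw in keywords if kw in low)
--         if score > 0:
--             buckets.setdefault(score, []).append(para)
--             if score > max_score:
--                 max_score = score
--     result: list[str] = []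
--     for s in range(max_score, 0, -1):
--         if s in buckets:
--             result.extend(buckets[s])
--     return "\n\n".join(result[:5])
-- ===== Notes on version B (the rewrite author's own statement) =====
-- stated objective: alternative
-- what changed: Replaces the comparison sort of scored paragraphs by counting-sort-style grouping: paragraphs are bucketed in a dict keyed by score in one pass, then buckets are emitted walking scores from the running maximum down to 1, reproducing the stable descending order.
import Mathlib
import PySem

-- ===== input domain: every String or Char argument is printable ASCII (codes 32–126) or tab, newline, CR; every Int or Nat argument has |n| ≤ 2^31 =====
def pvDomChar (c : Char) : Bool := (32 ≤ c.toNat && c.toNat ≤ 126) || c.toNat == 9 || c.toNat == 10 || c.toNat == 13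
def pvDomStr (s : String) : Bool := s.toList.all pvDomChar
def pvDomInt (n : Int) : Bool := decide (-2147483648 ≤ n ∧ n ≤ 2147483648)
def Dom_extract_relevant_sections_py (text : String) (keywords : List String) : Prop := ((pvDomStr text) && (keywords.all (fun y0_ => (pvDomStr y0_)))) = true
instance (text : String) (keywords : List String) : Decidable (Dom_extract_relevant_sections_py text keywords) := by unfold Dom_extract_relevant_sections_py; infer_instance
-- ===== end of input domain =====

-- B replaces A's comparison sort of scored paragraphs by counting-sort-style score buckets
-- walked from the maximum score down (same values; objective: alternative algorithm).

-- ===== PORT A =====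
def extract_relevant_sections_py (text : String) (keywords : List String) : String :=
  -- text.split("\n\n"): the separator is the nonempty literal "\n\n", so split? is always `some`
  let paragraphs := (PySem.Str.split? text "\n\n").getD []
  let scored := paragraphs.foldl (fun acc para =>
    if PySem.Str.strip para = "" then acc
    else
      let score : Int := (keywords.map (fun kw => if PySem.Str.isIn kw (PySem.Str.lower para) then (1 : Int) else 0)).sum
      if 0 < score then acc ++ [(score, para)] else acc) []
  let sortedScored := PySem.List.sorted scored (fun x => x.1) true
  PySem.Str.join "\n\n" ((PySem.List.slice sortedScored none (some 5)).map (fun x => x.2))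

-- ===== PORT B =====
def extract_relevant_sections_py_alt (text : String) (keywords : List String) : String :=
  -- one pass: buckets (dict score -> paragraphs, via setdefault+append = modify) and the running max
  let bm := ((PySem.Str.split? text "\n\n").getD []).foldl
    (fun (bm : PySem.Dict Int (List String) × Int) para =>
      if PySem.Str.strip para = "" then bm
      else
        let low := PySem.Str.lower para
        let score : Int := (keywords.map (fun kw => if PySem.Str.isIn kw low then (1 : Int) else 0)).sum
        if 0 < score then
          (bm.1.modify score [] (fun l => l ++ [para]), if bm.2 < score then score else bm.2)
        else bm) (PySem.Dict.empty, 0)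
  -- for s in range(max_score, 0, -1): if s in buckets: result.extend(buckets[s])
  let result := (PySem.List.pyRange bm.2 0 (-1)).foldl
    (fun res s => if bm.1.contains s then res ++ bm.1.getD s [] else res) []
  PySem.Str.join "\n\n" (PySem.List.slice result none (some 5))

-- ===== PRECONDITION & SPEC =====
def Spec_extract_relevant_sections_py (text : String) (keywords : List String) (out : String) : Prop := out = extract_relevant_sections_py_alt text keywords
instance (text : String) (keywords : List String) (out : String) : Decidable (Spec_extract_relevant_sections_py text keywords out) := by unfold Spec_extract_relevant_sections_py; infer_instance

-- ===== CLAIM (what is proved, stated in full; the proofs are below) =====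
def Claim_equal_extract_relevant_sections_py : Prop := ∀ (text : String) (keywords : List String), Dom_extract_relevant_sections_py text keywords → Spec_extract_relevant_sections_py text keywords (extract_relevant_sections_py text keywords)

-- ===== LEMMAS AND PROOFS =====

-- the per-paragraph score and the "paragraph qualifies" test, shared by the proofs below
def pvScore (keywords : List String) (para : String) : Int :=
  (keywords.map (fun kw => if PySem.Str.isIn kw (PySem.Str.lower para) then (1 : Int) else 0)).sum

def pvQual (keywords : List String) (para : String) : Bool :=
  decide (¬ PySem.Str.strip para = "") && decide (0 < pvScore keywords para)

-- insertBy skips a prefix it is not inserted before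
theorem pv_insertBy_append_left {α : Type} (before : α → α → Bool) (x : α) (u v : List α)
    (h : ∀ y ∈ u, before x y = false) :
    PySem.List.insertBy before x (u ++ v) = u ++ PySem.List.insertBy before x v := by
  induction u with
  | nil => rfl
  | cons y u ih =>
    have hy : before x y = false := h y (by simp)
    simp [PySem.List.insertBy, hy, ih (fun z hz => h z (by simp [hz]))]

-- insertBy puts x in front when it goes before the whole list
theorem pv_insertBy_front {α : Type} (before : α → α → Bool) (x : α) (v : List α)
    (h : ∀ y ∈ v, before x y = true) :
    PySem.List.insertBy before x v = x :: v := by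
  cases v with
  | nil => rfl
  | cons y ys => simp [PySem.List.insertBy, h y (by simp)]

-- stable descending sort splits off the elements with the maximal admissible key
theorem pv_sorted_rev_split (M : Int) (L : List (Int × String))
    (hM : ∀ pr ∈ L, pr.1 ≤ M) :
    PySem.List.sorted L (fun x => x.1) true =
      L.filter (fun pr => pr.1 == M) ++
        PySem.List.sorted (L.filter (fun pr => !(pr.1 == M))) (fun x => x.1) true := by
  induction L using List.reverseRecOn with
  | nil => simp [PySem.List.sorted]
  | append_singleton L x ih =>
    have hx : x.1 ≤ M := hM x (by simp)
    have hL : ∀ pr ∈ L, pr.1 ≤ M := fun pr hpr => hM pr (by simp [hpr])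
    rw [PySem.List.sorted_rev_eq_foldl_insertBy, List.foldl_append]
    simp only [List.foldl_cons, List.foldl_nil]
    rw [← PySem.List.sorted_rev_eq_foldl_insertBy, ih hL]
    by_cases hxM : x.1 = M
    · -- x joins the maximal bucket, right after the earlier maximal elements
      have h1 : ∀ y ∈ L.filter (fun pr => pr.1 == M), (fun a b => decide (b.1 < a.1)) x y = false := by
        intro y hy
        have : y.1 = M := by simpa using (List.of_mem_filter hy)
        simp [this, hxM]
      rw [pv_insertBy_append_left _ _ _ _ h1]
      have h2 : PySem.List.insertBy (fun a b => decide (b.1 < a.1)) x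
          (PySem.List.sorted (L.filter (fun pr => !(pr.1 == M))) (fun x => x.1) true) =
          x :: PySem.List.sorted (L.filter (fun pr => !(pr.1 == M))) (fun x => x.1) true := by
        apply pv_insertBy_front
        intro y hy
        have hy' : y ∈ L.filter (fun pr => !(pr.1 == M)) := (PySem.List.mem_sorted _ _ _ _).1 hy
        have hyM : ¬ (y.1 = M) := by simpa using (List.of_mem_filter hy')
        have : y.1 ≤ M := hL y (List.mem_of_mem_filter hy')
        simp only [hxM, decide_eq_true_eq]
        omega
      rw [h2]
      simp [List.filter_append, hxM]
    · have h1 : ∀ y ∈ L.filter (fun pr => pr.1 == M), (fun a b => decide (b.1 < a.1)) x y = false := by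
        intro y hy
        have : y.1 = M := by simpa using (List.of_mem_filter hy)
        simp only [this, decide_eq_false_iff_not]
        omega
      rw [pv_insertBy_append_left _ _ _ _ h1]
      have h3 : PySem.List.sorted ((L.filter (fun pr => !(pr.1 == M))) ++ [x]) (fun x => x.1) true =
          PySem.List.insertBy (fun a b => decide (b.1 < a.1)) x
            (PySem.List.sorted (L.filter (fun pr => !(pr.1 == M))) (fun x => x.1) true) := by
        rw [PySem.List.sorted_rev_eq_foldl_insertBy, List.foldl_append]
        simp only [List.foldl_cons, List.foldl_nil]
        rw [← PySem.List.sorted_rev_eq_foldl_insertBy]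
      simp [List.filter_append, hxM, h3]

-- descending ranges: range(n+1, 0, -1) = (n+1) :: range(n, 0, -1)
theorem pv_descRange_succ (n : Nat) :
    PySem.List.pyRange ((n : Int) + 1) 0 (-1) = ((n : Int) + 1) :: PySem.List.pyRange (n : Int) 0 (-1) := by
  simp only [PySem.List.pyRange]
  norm_num
  cases n with
  | zero => simp [List.range_succ_eq_map]
  | succ m =>
    rw [if_pos (Nat.succ_pos m), List.range_succ_eq_map]
    simp only [List.map_cons, List.map_map]
    rw [List.cons_eq_cons]; constructor
    · push_cast; ring
    · apply List.map_congr_left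
      intro k _
      simp only [Function.comp_apply, Nat.succ_eq_add_one]
      push_cast; ring

theorem pv_descRange_zero : PySem.List.pyRange ((0 : Nat) : Int) 0 (-1) = [] := by
  simp [PySem.List.pyRange]

theorem pv_mem_descRange (n : Nat) (s : Int) (h : s ∈ PySem.List.pyRange (n : Int) 0 (-1)) :
    1 ≤ s ∧ s ≤ (n : Int) := by
  induction n with
  | zero => rw [pv_descRange_zero] at h; simp at h
  | succ m ih =>
    rw [show ((m + 1 : Nat) : Int) = (m : Int) + 1 by push_cast; ring, pv_descRange_succ] at h
    rcases List.mem_cons.1 h with h | h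
    · omega
    · have := ih h; omega

-- the counting-sort walk over scores reproduces the stable descending sort
theorem pv_core (n : Nat) (L : List (Int × String))
    (h : ∀ pr ∈ L, 1 ≤ pr.1 ∧ pr.1 ≤ (n : Int)) :
    (PySem.List.pyRange (n : Int) 0 (-1)).flatMap (fun s => L.filter (fun pr => pr.1 == s)) =
      PySem.List.sorted L (fun x => x.1) true := by
  induction n generalizing L with
  | zero =>
    have hL : L = [] := by
      cases L with
      | nil => rfl
      | cons pr t => exact absurd (h pr (by simp)) (by push_cast; omega)
    simp [hL, PySem.List.sorted]
  | succ m ih =>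
    have hc : ((m + 1 : Nat) : Int) = (m : Int) + 1 := by push_cast; ring
    rw [hc, pv_descRange_succ, List.flatMap_cons]
    set M : Int := (m : Int) + 1 with hMdef
    have hsplit := pv_sorted_rev_split M L (fun pr hpr => by have := h pr hpr; omega)
    rw [hsplit]
    congr 1
    have htail : ∀ s ∈ PySem.List.pyRange (m : Int) 0 (-1),
        L.filter (fun pr => pr.1 == s) =
          (L.filter (fun pr => !(pr.1 == M))).filter (fun pr => pr.1 == s) := by
      intro s hs
      have hsb := pv_mem_descRange m s hs
      rw [List.filter_filter]
      apply List.filter_congr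
      intro pr _
      by_cases hp : pr.1 = s
      · simp [hp]; omega
      · simp [hp]
    calc (PySem.List.pyRange (m : Int) 0 (-1)).flatMap (fun s => L.filter (fun pr => pr.1 == s))
        = (PySem.List.pyRange (m : Int) 0 (-1)).flatMap
            (fun s => (L.filter (fun pr => !(pr.1 == M))).filter (fun pr => pr.1 == s)) := by
          simp only [List.flatMap]
          exact congrArg List.flatten (List.map_congr_left htail)
      _ = PySem.List.sorted (L.filter (fun pr => !(pr.1 == M))) (fun x => x.1) true := by
          apply ih
          intro pr hpr
          have h1 := h pr (List.mem_of_mem_filter hpr)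
          have h2 : ¬ (pr.1 = M) := by simpa using List.of_mem_filter hpr
          omega

-- ===== VERDICT (by name: the statement is the Claim_ definition above) =====
theorem pv_if_lt_max (a b : Int) : (if a < b then b else a) = max a b := by
  rcases lt_or_ge a b with h | h
  · simp [h, max_eq_right h.le]
  · simp [not_lt.2 h, max_eq_left h]

theorem extract_relevant_sections_py_spec : Claim_equal_extract_relevant_sections_py := by
  intro text kws _
  show extract_relevant_sections_py text kws = extract_relevant_sections_py_alt text kws
  set Fd := fun (d : PySem.Dict Int (List String)) para =>
      if pvQual kws para = true then d.modify (pvScore kws para) [] (fun l => l ++ [para]) else d with hFd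
  set Fm := fun (m : Int) para => if pvQual kws para = true then max m (pvScore kws para) else m with hFm
  -- canonical forms of the two loop bodies
  have hA : (fun (acc : List (Int × String)) para =>
      if PySem.Str.strip para = "" then acc
      else
        let score : Int := (kws.map (fun kw => if PySem.Str.isIn kw (PySem.Str.lower para) then (1 : Int) else 0)).sum
        if 0 < score then acc ++ [(score, para)] else acc)
      = fun acc para => if pvQual kws para = true then acc ++ [(pvScore kws para, para)] else acc := by
    funext acc para
    have hsum : (kws.map (fun kw => if PySem.Str.isIn kw (PySem.Str.lower para) then (1 : Int) else 0)).sum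
        = pvScore kws para := rfl
    simp only [hsum]
    by_cases h1 : PySem.Str.strip para = "" <;> by_cases h2 : 0 < pvScore kws para <;>
      simp [pvQual, h1, h2]
  have hB : (fun (bm : PySem.Dict Int (List String) × Int) para =>
      if PySem.Str.strip para = "" then bm
      else
        let low := PySem.Str.lower para
        let score : Int := (kws.map (fun kw => if PySem.Str.isIn kw low then (1 : Int) else 0)).sum
        if 0 < score then
          (bm.1.modify score [] (fun l => l ++ [para]), if bm.2 < score then score else bm.2)
        else bm)
      = fun (bm : PySem.Dict Int (List String) × Int) para => (Fd bm.1 para, Fm bm.2 para) := by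
    funext bm para
    have hsum : (kws.map (fun kw => if PySem.Str.isIn kw (PySem.Str.lower para) then (1 : Int) else 0)).sum
        = pvScore kws para := rfl
    simp only [hsum]
    by_cases h1 : PySem.Str.strip para = "" <;> by_cases h2 : 0 < pvScore kws para <;>
      simp [hFd, hFm, pvQual, h1, h2, pv_if_lt_max]
  unfold extract_relevant_sections_py extract_relevant_sections_py_alt
  set ps := (PySem.Str.split? text "\n\n").getD [] with hps
  have hpair : ps.foldl (fun (bm : PySem.Dict Int (List String) × Int) para =>
      if PySem.Str.strip para = "" then bm
      else
        let low := PySem.Str.lower para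
        let score : Int := (kws.map (fun kw => if PySem.Str.isIn kw low then (1 : Int) else 0)).sum
        if 0 < score then
          (bm.1.modify score [] (fun l => l ++ [para]), if bm.2 < score then score else bm.2)
        else bm) (PySem.Dict.empty, 0)
      = (ps.foldl Fd PySem.Dict.empty, ps.foldl Fm 0) := by
    rw [hB]
    exact PySem.List.foldl_prod_mk Fd Fm ps PySem.Dict.empty 0
  simp only [hA, hpair, PySem.List.foldl_append_if, List.nil_append]
  set scoredList := (ps.filter (fun para => pvQual kws para)).map (fun para => (pvScore kws para, para)) with hsl
  have hbuck : scoredList.foldl (fun d pr => PySem.Dict.modify d pr.1 [] (fun l => l ++ [pr.2])) PySem.Dict.empty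
      = ps.foldl Fd PySem.Dict.empty := by
    rw [hsl, List.foldl_map, List.foldl_filter]
  have hget : ∀ s : Int, (ps.foldl Fd PySem.Dict.empty).getD s []
      = (scoredList.filter (fun pr => pr.1 == s)).map (fun pr => pr.2) := by
    intro s
    rw [← hbuck, PySem.Dict.getD_foldl_modify_append]
    simp
  have hmax : ps.foldl Fm 0 = (scoredList.map (fun pr => pr.1)).foldl max 0 := by
    rw [hsl, List.map_map, List.foldl_map, List.foldl_filter]
    rfl
  have h0 : (0 : Int) ≤ ps.foldl Fm 0 := by
    rw [hmax]; exact (PySem.List.le_foldl_max _ 0).1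
  have hbound : ∀ pr ∈ scoredList, 1 ≤ pr.1 ∧ pr.1 ≤ ((ps.foldl Fm 0).toNat : Int) := by
    intro pr hpr
    have hle : pr.1 ≤ ps.foldl Fm 0 := by
      rw [hmax]
      exact (PySem.List.le_foldl_max (scoredList.map (fun pr => pr.1)) 0).2 pr.1
        (List.mem_map_of_mem hpr)
    obtain ⟨p, hp, hpe⟩ := List.mem_map.1 hpr
    have hq : pvQual kws p = true := (List.mem_filter.1 hp).2
    have h1 : 0 < pvScore kws p := by
      simp [pvQual] at hq
      exact hq.2
    have h2 : pr.1 = pvScore kws p := by rw [← hpe]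
    omega
  have hcontains : (fun (res : List String) (s : Int) =>
        if (ps.foldl Fd PySem.Dict.empty).contains s then res ++ (ps.foldl Fd PySem.Dict.empty).getD s [] else res)
      = fun res s => res ++ (ps.foldl Fd PySem.Dict.empty).getD s [] := by
    funext res s
    cases hc : (ps.foldl Fd PySem.Dict.empty).contains s
    · rw [if_neg (by simp), PySem.Dict.getD_of_not_contains _ _ hc, List.append_nil]
    · simp
  rw [hcontains, PySem.List.foldl_append_eq_flatMap, List.nil_append]
  have hgetfun : (fun s => (ps.foldl Fd PySem.Dict.empty).getD s [])
      = fun s => (scoredList.filter (fun pr => pr.1 == s)).map (fun pr => pr.2) := funext hget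
  rw [hgetfun, ← List.map_flatMap]
  rw [show ps.foldl Fm 0 = ((ps.foldl Fm 0).toNat : Int) from (Int.toNat_of_nonneg h0).symm]
  rw [pv_core (ps.foldl Fm 0).toNat scoredList hbound]
  rw [PySem.List.slice_to _ (by norm_num), PySem.List.slice_to _ (by norm_num), List.map_take]
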